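-- pv_equiv track=rewrite | github.com/Matthew1081/AG_52730_54159 | import_data.py | napraw_osobnik
-- ===== SOURCE A (Python) =====
-- def napraw_osobnik(chromosom, items, capacity):
--     while True:
--         waga = sum(items[i][0] for i in range(len(chromosom)) if chromosom[i] == 1)
--         if waga <= capacity:
--             break
--         for i in range(len(chromosom)):
--             if chromosom[i] == 1:
--                 chromosom[i] = 0
--                 break
--     return chromosom
-- ===== SOURCE B (Python) =====
-- def napraw_osobnik(chromosom, items, capacity):
--     total = sum(it[0] for g, it in zip(chromosom, items) if g == 1)
--     out = []
--     for g, it in zip(chromosom, items):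
--         if total > capacity and g == 1:
--             total -= it[0]
--             out.append(0)
--         else:
--             out.append(g)
--     out.extend(chromosom[len(items):])
--     return out
-- ===== Notes on version B (the rewrite author's own statement) =====
-- stated objective: alternative
-- what changed: Replaces A's repeated full rescans (recompute the whole knapsack weight, zero the leftmost 1, repeat) by a single pass: compute the total weight once, then walk left to right zeroing 1s while incrementally subtracting their weights until the running total fits.
import Mathlib
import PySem

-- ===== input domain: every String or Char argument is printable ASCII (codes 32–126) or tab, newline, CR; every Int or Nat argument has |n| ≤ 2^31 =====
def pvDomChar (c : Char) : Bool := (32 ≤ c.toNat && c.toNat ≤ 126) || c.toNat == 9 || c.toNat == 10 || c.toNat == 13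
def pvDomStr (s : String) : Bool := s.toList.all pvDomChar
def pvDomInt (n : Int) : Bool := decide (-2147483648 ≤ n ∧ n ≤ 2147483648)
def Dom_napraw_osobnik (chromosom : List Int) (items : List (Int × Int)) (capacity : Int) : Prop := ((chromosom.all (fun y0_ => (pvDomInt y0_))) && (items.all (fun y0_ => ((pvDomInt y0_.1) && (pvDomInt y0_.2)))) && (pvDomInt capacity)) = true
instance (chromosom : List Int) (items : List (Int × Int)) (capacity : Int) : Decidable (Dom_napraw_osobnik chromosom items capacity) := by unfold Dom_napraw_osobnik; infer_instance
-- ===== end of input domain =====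

-- B computes the total weight once and zeroes leftmost 1s in one pass with incremental subtraction
-- instead of A's repeated full rescans; the equivalence is about the RETURN value only: Python A
-- mutates `chromosom` in place, B builds a fresh list.

-- ===== PORT A =====
-- `for i in range(len(chromosom)): if chromosom[i] == 1: chromosom[i] = 0; break`
def pvZeroFirst : List Int → List Int
  | [] => []
  | g :: gs => if g = 1 then 0 :: gs else g :: pvZeroFirst gs

-- `waga = sum(items[i][0] for i in range(len(chromosom)) if chromosom[i] == 1)`
-- (pyGetD is exact on Pre_, where every accessed index is in range)
def pvWagaA (chromosom : List Int) (items : List (Int × Int)) : Int :=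
  (PySem.List.pyRange 0 chromosom.length 1).foldl
    (fun acc i => if PySem.List.pyGetD chromosom i 0 = 1 then acc + (PySem.List.pyGetD items i (0, 0)).1 else acc) 0

-- the `while True` loop; each non-breaking iteration zeroes one 1, so under Pre_ a fuel of
-- chromosom.length + 1 is never exhausted (the Python diverges exactly where it would be)
def pvLoopA : Nat → List Int → List (Int × Int) → Int → List Int
  | 0, c, _, _ => c
  | fuel + 1, c, items, capacity =>
    let waga := pvWagaA c items
    if waga ≤ capacity then c
    else pvLoopA fuel (pvZeroFirst c) items capacity

def napraw_osobnik (chromosom : List Int) (items : List (Int × Int)) (capacity : Int) : List Int :=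
  pvLoopA (chromosom.length + 1) chromosom items capacity

-- ===== PORT B =====
-- the single forward pass of Source B: zero a 1 while the running total still exceeds capacity
def pvFix (total capacity : Int) : List (Int × (Int × Int)) → List Int
  | [] => []
  | (g, it) :: rest =>
    if total > capacity ∧ g = 1 then 0 :: pvFix (total - it.1) capacity rest
    else g :: pvFix total capacity rest

def napraw_osobnik_alt (chromosom : List Int) (items : List (Int × Int)) (capacity : Int) : List Int :=
  let total := (chromosom.zip items).foldl (fun acc p => if p.1 = 1 then acc + p.2.1 else acc) 0
  pvFix total capacity (chromosom.zip items) ++ chromosom.drop items.length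

-- ===== PRECONDITION & SPEC =====
-- weights of the selected (gene = 1) in-range items, in order
def pvOnesW (chromosom : List Int) (items : List (Int × Int)) : List Int :=
  (chromosom.zip items).filterMap (fun p => if p.1 = 1 then some p.2.1 else none)

-- Pre_ excludes exactly the inputs on which A never returns: a gene 1 at an index ≥ len(items)
-- (IndexError on the first weight sum) and inputs whose weight stays above capacity even after
-- zeroing every 1 (the while-loop then spins forever, e.g. a negative capacity).
def Pre_napraw_osobnik (chromosom : List Int) (items : List (Int × Int)) (capacity : Int) : Prop :=
  (∀ g ∈ chromosom.drop items.length, g ≠ 1) ∧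
  ∃ k ∈ List.range ((pvOnesW chromosom items).length + 1), ((pvOnesW chromosom items).drop k).sum ≤ capacity

instance (chromosom : List Int) (items : List (Int × Int)) (capacity : Int) : Decidable (Pre_napraw_osobnik chromosom items capacity) := by unfold Pre_napraw_osobnik; infer_instance

def pvWitness_napraw_osobnik : List Int × (List (Int × Int)) × Int := ([1, 0, 1], [(2, 3), (4, 5), (3, 1)], 4)

def Spec_napraw_osobnik (chromosom : List Int) (items : List (Int × Int)) (capacity : Int) (out : List Int) : Prop := out = napraw_osobnik_alt chromosom items capacity
instance (chromosom : List Int) (items : List (Int × Int)) (capacity : Int) (out : List Int) : Decidable (Spec_napraw_osobnik chromosom items capacity out) := by unfold Spec_napraw_osobnik; infer_instance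

-- ===== CLAIM (what is proved, stated in full; the proofs are below) =====
def Claim_equal_napraw_osobnik : Prop := ∀ (chromosom : List Int) (items : List (Int × Int)) (capacity : Int), Dom_napraw_osobnik chromosom items capacity → Pre_napraw_osobnik chromosom items capacity → Spec_napraw_osobnik chromosom items capacity (napraw_osobnik chromosom items capacity)


-- ===== LEMMAS AND PROOFS =====

-- the selected weights of a zipped gene/item list (pvOnesW chromosom items = pvOW (chromosom.zip items))
def pvOW (l : List (Int × (Int × Int))) : List Int :=
  l.filterMap (fun p => if p.1 = 1 then some p.2.1 else none)

-- recursive form of the selected-weight sum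
def pvWsum : List (Int × (Int × Int)) → Int
  | [] => 0
  | (g, it) :: r => (if g = 1 then it.1 else 0) + pvWsum r

-- zero the first selected pair
def pvPzf : List (Int × (Int × Int)) → List (Int × (Int × Int))
  | [] => []
  | (g, it) :: r => if g = 1 then (0, it) :: r else (g, it) :: pvPzf r

theorem pvOnesW_eq (c : List Int) (items : List (Int × Int)) : pvOnesW c items = pvOW (c.zip items) := rfl

theorem pvWsum_eq_sum (l : List (Int × (Int × Int))) : pvWsum l = (pvOW l).sum := by
  induction l with
  | nil => rfl
  | cons p r ih =>
    obtain ⟨g, it⟩ := p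
    by_cases h : g = 1 <;> simp [pvWsum, pvOW, h, ih]

theorem pvFoldl_wsum (l : List (Int × (Int × Int))) (a : Int) :
    l.foldl (fun acc p => if p.1 = 1 then acc + p.2.1 else acc) a = a + pvWsum l := by
  induction l generalizing a with
  | nil => simp [pvWsum]
  | cons p r ih =>
    obtain ⟨g, it⟩ := p
    by_cases h : g = 1 <;> simp [pvWsum, h, ih] <;> ring

theorem pvZeroFirst_zip (c : List Int) (items : List (Int × Int)) :
    (pvZeroFirst c).zip items = pvPzf (c.zip items) := by
  induction c generalizing items with
  | nil => simp [pvZeroFirst, pvPzf]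
  | cons g c' ih =>
    cases items with
    | nil =>
      by_cases h : g = 1 <;> simp [pvZeroFirst, h, pvPzf]
    | cons it its =>
      by_cases h : g = 1 <;> simp [pvZeroFirst, h, pvPzf, ih]

theorem pvOW_pzf (l : List (Int × (Int × Int))) : pvOW (pvPzf l) = (pvOW l).tail := by
  induction l with
  | nil => rfl
  | cons p r ih =>
    obtain ⟨g, it⟩ := p
    by_cases h : g = 1 <;> simp [pvPzf, pvOW, h] at * <;> simpa [pvOW] using ih

theorem pvZeroFirst_drop (c : List Int) (items : List (Int × Int))
    (h : pvOW (c.zip items) ≠ []) :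
    (pvZeroFirst c).drop items.length = c.drop items.length := by
  induction c generalizing items with
  | nil => simp [pvZeroFirst]
  | cons g c' ih =>
    cases items with
    | nil => simp [pvOW] at h
    | cons it its =>
      by_cases hg : g = 1
      · simp [pvZeroFirst, hg]
      · simp only [pvZeroFirst, if_neg hg, List.length_cons, List.drop_succ_cons]
        exact ih its (by simpa [pvOW, hg] using h)

-- one step of B's pass: when the total is still over capacity, zeroing the first selected pair
-- and subtracting its weight does not change the produced list
theorem pvFix_step (l : List (Int × (Int × Int))) (total capacity : Int) (h : total > capacity) :
    pvFix total capacity l = pvFix (total - (pvOW l).headD 0) capacity (pvPzf l) := by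
  induction l generalizing total with
  | nil => simp [pvFix, pvPzf]
  | cons p r ih =>
    obtain ⟨g, it⟩ := p
    by_cases hg : g = 1
    · simp [pvFix, pvPzf, pvOW, hg, h]
    · simp [pvFix, pvPzf, pvOW, hg, h, ih total h]

theorem pvFix_done (l : List (Int × (Int × Int))) (total capacity : Int) (h : total ≤ capacity) :
    pvFix total capacity l = l.map Prod.fst := by
  induction l with
  | nil => rfl
  | cons p r ih =>
    obtain ⟨g, it⟩ := p
    have hng : ¬ (total > capacity ∧ g = 1) := fun hc => absurd h (not_le.mpr hc.1)
    simp [pvFix, hng, ih]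

-- the index-based waga of A equals the zip-based selected-weight sum (no gene 1 past the items)
theorem pvWaga_idx (c : List Int) (items : List (Int × Int)) (a : Int)
    (h : ∀ g ∈ c.drop items.length, g ≠ 1) :
    (List.range c.length).foldl
      (fun acc k => if c.getD k 0 = 1 then acc + (items.getD k (0, 0)).1 else acc) a
      = a + pvWsum (c.zip items) := by
  induction c generalizing items a with
  | nil => simp [pvWsum]
  | cons g c' ih =>
    simp only [List.length_cons]
    rw [List.range_succ_eq_map, List.foldl_cons, List.foldl_map]
    cases items with
    | nil =>
      have hall : ∀ x ∈ g :: c', x ≠ 1 := by simpa using h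
      have h0 : ¬ ((g :: c').getD 0 0 = 1) := by
        simpa using hall g (by simp)
      rw [if_neg h0]
      simp [pvWsum]
    | cons it its =>
      simp only [List.getD_cons_zero, List.getD_cons_succ]
      have h' : ∀ x ∈ c'.drop its.length, x ≠ 1 := by
        intro x hx; exact h x (by simpa using hx)
      rw [ih its _ h']
      by_cases hg : g = 1 <;> simp [hg, pvWsum] <;> ring

theorem pvWagaA_eq (c : List Int) (items : List (Int × Int))
    (h : ∀ g ∈ c.drop items.length, g ≠ 1) :
    pvWagaA c items = pvWsum (c.zip items) := by
  unfold pvWagaA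
  rw [PySem.List.pyRange_one, List.foldl_map]
  simp only [Int.sub_zero, Int.toNat_natCast, zero_add, PySem.List.pyGetD_natCast]
  simpa using pvWaga_idx c items 0 h

theorem pvMapFst_zip (c : List Int) (items : List (Int × Int)) :
    (c.zip items).map Prod.fst = c.take items.length := by
  induction c generalizing items with
  | nil => simp
  | cons g c' ih =>
    cases items with
    | nil => simp
    | cons it its => simp [ih]

theorem pvAlt_eq (c : List Int) (items : List (Int × Int)) (capacity : Int) :
    napraw_osobnik_alt c items capacity
      = pvFix (pvWsum (c.zip items)) capacity (c.zip items) ++ c.drop items.length := by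
  unfold napraw_osobnik_alt
  rw [pvFoldl_wsum, Int.zero_add]

-- the main induction: with n selected weights and enough fuel, A's loop equals B's pass
theorem pvMain (n : Nat) : ∀ (c : List Int) (items : List (Int × Int)) (capacity : Int),
    (pvOW (c.zip items)).length = n →
    (∀ g ∈ c.drop items.length, g ≠ 1) →
    (∃ k ∈ List.range (n + 1), ((pvOW (c.zip items)).drop k).sum ≤ capacity) →
    ∀ fuel, n < fuel → pvLoopA fuel c items capacity = napraw_osobnik_alt c items capacity := by
  induction n with
  | zero =>
    intro c items capacity hlen htr hex fuel hfuel
    obtain ⟨fuel', rfl⟩ : ∃ f, fuel = f + 1 := ⟨fuel - 1, by omega⟩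
    have hnil : pvOW (c.zip items) = [] := List.length_eq_zero_iff.mp hlen
    have hw : pvWsum (c.zip items) ≤ capacity := by
      obtain ⟨k, _, hk⟩ := hex
      rw [pvWsum_eq_sum, hnil]
      simpa [hnil] using hk
    have hwa : pvWagaA c items ≤ capacity := by rw [pvWagaA_eq c items htr]; exact hw
    simp only [pvLoopA, if_pos hwa]
    rw [pvAlt_eq, pvFix_done _ _ _ hw, pvMapFst_zip, List.take_append_drop]
  | succ n ih =>
    intro c items capacity hlen htr hex fuel hfuel
    obtain ⟨fuel', rfl⟩ : ∃ f, fuel = f + 1 := ⟨fuel - 1, by omega⟩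
    have hwaga : pvWagaA c items = pvWsum (c.zip items) := pvWagaA_eq c items htr
    by_cases hle : pvWagaA c items ≤ capacity
    · simp only [pvLoopA, if_pos hle]
      rw [pvAlt_eq, pvFix_done _ _ _ (hwaga ▸ hle), pvMapFst_zip, List.take_append_drop]
    · simp only [pvLoopA, if_neg hle]
      have hgt : pvWsum (c.zip items) > capacity := by omega
      have hne : pvOW (c.zip items) ≠ [] := by
        intro hnil; rw [hnil] at hlen; simp at hlen
      have hzip : (pvZeroFirst c).zip items = pvPzf (c.zip items) := pvZeroFirst_zip c items
      have hdrop : (pvZeroFirst c).drop items.length = c.drop items.length :=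
        pvZeroFirst_drop c items hne
      have hlen' : (pvOW ((pvZeroFirst c).zip items)).length = n := by
        rw [hzip, pvOW_pzf, List.length_tail, hlen]
        omega
      have htr' : ∀ g ∈ (pvZeroFirst c).drop items.length, g ≠ 1 := by rw [hdrop]; exact htr
      have hex' : ∃ k ∈ List.range (n + 1), ((pvOW ((pvZeroFirst c).zip items)).drop k).sum ≤ capacity := by
        obtain ⟨k, hkmem, hk⟩ := hex
        have hk0 : k ≠ 0 := by
          intro h0; rw [h0] at hk; simp only [List.drop_zero] at hk
          rw [pvWsum_eq_sum] at hgt; omega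
        refine ⟨k - 1, List.mem_range.mpr (by have := List.mem_range.mp hkmem; omega), ?_⟩
        rw [hzip, pvOW_pzf, List.drop_tail, show k - 1 + 1 = k by omega]
        exact hk
      rw [ih (pvZeroFirst c) items capacity hlen' htr' hex' fuel' (by omega)]
      -- B's pass is invariant under zeroing the first selected gene
      obtain ⟨h0, t, hcons⟩ : ∃ h0 t, pvOW (c.zip items) = h0 :: t := by
        cases hOW : pvOW (c.zip items) with
        | nil => exact absurd hOW hne
        | cons a b => exact ⟨a, b, rfl⟩
      have hsum' : pvWsum (pvPzf (c.zip items)) = pvWsum (c.zip items) - h0 := by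
        rw [pvWsum_eq_sum, pvWsum_eq_sum, pvOW_pzf, hcons]; simp
      have hstep := pvFix_step (c.zip items) (pvWsum (c.zip items)) capacity hgt
      rw [hcons] at hstep
      simp only [List.headD_cons] at hstep
      rw [pvAlt_eq, pvAlt_eq, hzip, hdrop, hsum']
      rw [hstep]

-- ===== VERDICT (by name: the statement is the Claim_ definition above) =====
theorem napraw_osobnik_spec : Claim_equal_napraw_osobnik := by
  intro c items capacity _ hpre
  unfold Spec_napraw_osobnik napraw_osobnik
  obtain ⟨htr, hex⟩ := hpre
  refine (pvMain (pvOW (c.zip items)).length c items capacity rfl htr ?_ _ ?_).symm ▸ rfl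
  · simpa [pvOnesW_eq] using hex
  · have h1 : (pvOW (c.zip items)).length ≤ (c.zip items).length := List.length_filterMap_le _ _
    have h2 : (c.zip items).length ≤ c.length := by rw [List.length_zip]; omega
    omega
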